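-- pv_equiv track=rewrite | github.com/nico/hack | aoc/2019/16b.py | step
-- ===== SOURCE A (Python) =====
-- import itertools
--
-- def step(state):
--     # Set up so that sum(state[k:k+n]) == cumsum[k+n] - cumsum[k]
--     # accumulate()'s initial= was added in 3.8, so have to manually prepend :/
--     cumsum = [0] + list(itertools.accumulate(state))
--
--     start, step, sign = 0, 1, 1
--     new_state = [0] * len(state)
--     for i in range(len(state)):
--         s = 0
--         for k in range(start, len(state), 2*step):
--             s += sign * (cumsum[min(k+step, len(cumsum)-1)] - cumsum[k])
--             sign = -sign
--         start += 1
--         step += 1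
--         sign = 1
--         new_state[i] = abs(s) % 10
--
--     return new_state
-- ===== SOURCE B (Python) =====
-- def step(state):
--     base = [0, 1, 0, -1]
--     n = len(state)
--     return [abs(sum(state[j] * base[((j + 1) // (i + 1)) % 4]
--                     for j in range(n))) % 10
--             for i in range(n)]
-- ===== Notes on version B (the rewrite author's own statement) =====
-- stated objective: simpler
-- what changed: Replaces A's prefix-sum table and block/sign iteration with the direct definition: for each output index i, sum state[j] times the repeating FFT base pattern value at ((j+1)//(i+1)) mod 4.
import Mathlib
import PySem

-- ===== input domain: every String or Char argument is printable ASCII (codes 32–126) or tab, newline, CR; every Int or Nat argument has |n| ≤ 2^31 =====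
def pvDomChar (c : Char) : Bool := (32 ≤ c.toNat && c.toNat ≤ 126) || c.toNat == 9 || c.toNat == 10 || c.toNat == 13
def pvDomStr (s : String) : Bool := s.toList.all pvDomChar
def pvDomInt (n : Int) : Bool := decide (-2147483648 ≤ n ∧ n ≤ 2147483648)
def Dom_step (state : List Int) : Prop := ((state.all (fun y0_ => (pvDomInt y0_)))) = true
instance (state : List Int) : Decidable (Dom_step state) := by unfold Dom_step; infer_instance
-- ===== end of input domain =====

-- B replaces A's prefix-sum table and block iteration by the direct double loop
-- over the repeating FFT base pattern (objective: simpler).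

-- ===== PORT A =====
-- cumsum = [0] + list(itertools.accumulate(state))  (running-total loop)
def stepAccum (state : List Int) : List Int × Int :=
  state.foldl (fun (acc : List Int × Int) x => (acc.1 ++ [acc.2 + x], acc.2 + x)) ([], 0)

-- body of the outer 'for i in range(len(state))' loop; loop state = (start, step, sign, new_state)
def stepBody (cumsum : List Int) (n : Int) (st : Int × Int × Int × List Int) (i : Int) :
    Int × Int × Int × List Int :=
  let inner :=
    (PySem.List.pyRange st.1 n (2 * st.2.1)).foldl
      (fun (p : Int × Int) k =>
        (p.1 + p.2 * (PySem.List.pyGetD cumsum (min (k + st.2.1) (PySem.List.len cumsum - 1)) 0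
                      - PySem.List.pyGetD cumsum k 0),
         -p.2))
      (0, st.2.2.1)
  (st.1 + 1, st.2.1 + 1, 1, PySem.List.pySetD st.2.2.2 i (PySem.Int.mod |inner.1| 10))

def step (state : List Int) : List Int :=
  let cumsum : List Int := [0] ++ (stepAccum state).1
  ((PySem.List.pyRange 0 (PySem.List.len state) 1).foldl
      (stepBody cumsum (PySem.List.len state))
      (0, 1, 1, List.replicate state.length 0)).2.2.2

-- ===== PORT B =====
-- sum(state[j] * base[((j+1)//(i+1)) % 4] for j in range(n))
def stepAltSum (state : List Int) (n i : Int) : Int :=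
  (PySem.List.pyRange 0 n 1).foldl
    (fun s j =>
      s + PySem.List.pyGetD state j 0 *
          PySem.List.pyGetD ([0, 1, 0, -1] : List Int)
            (PySem.Int.mod (PySem.Int.floordiv (j + 1) (i + 1)) 4) 0)
    0

def step_alt (state : List Int) : List Int :=
  (PySem.List.pyRange 0 (PySem.List.len state) 1).map
    (fun i => PySem.Int.mod |stepAltSum state (PySem.List.len state) i| 10)

-- ===== PRECONDITION & SPEC =====
def Spec_step (state : List Int) (out : List Int) : Prop := out = step_alt state
instance (state : List Int) (out : List Int) : Decidable (Spec_step state out) := by unfold Spec_step; infer_instance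

-- ===== CLAIM (what is proved, stated in full; the proofs are below) =====
def Claim_equal_step : Prop := ∀ (state : List Int), Dom_step state → Spec_step state (step state)

-- ===== LEMMAS AND PROOFS =====

-- element access, prefix sums, and the two pattern tables used by the proofs
def pvG (state : List Int) (j : Nat) : Int := state.getD j 0
def pvC (state : List Int) (m : Nat) : Int := ∑ j ∈ Finset.range m, pvG state j
def pvPat (q : Nat) : Int := if q % 4 = 1 then 1 else if q % 4 = 3 then -1 else 0
def pvPat' (q : Nat) : Int := if q % 4 = 0 then 1 else if q % 4 = 2 then -1 else 0

theorem pvPat_succ (q : Nat) : pvPat (q + 1) = pvPat' q := by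
  unfold pvPat pvPat'
  have h : q % 4 = 0 ∨ q % 4 = 1 ∨ q % 4 = 2 ∨ q % 4 = 3 := by omega
  rcases h with h | h | h | h <;>
    (have h1 : (q+1) % 4 = (q % 4 + 1) % 4 := by omega) <;> simp [h1, h]

theorem pvPat'_add_two (q : Nat) : pvPat' (q + 2) = -pvPat' q := by
  unfold pvPat'
  have h : q % 4 = 0 ∨ q % 4 = 1 ∨ q % 4 = 2 ∨ q % 4 = 3 := by omega
  rcases h with h | h | h | h <;>
    (have h1 : (q+2) % 4 = (q % 4 + 2) % 4 := by omega) <;> simp [h1, h]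

-- ---- general pyRange cons/nil for a positive step ----
theorem pyRange_pos_nil (a b d : Int) (hd : 0 < d) (h : b ≤ a) :
    PySem.List.pyRange a b d = [] := by
  rw [PySem.List.pyRange_of_pos a b hd]
  simp [show ¬ a < b by omega]

theorem pyRange_pos_cons (a b d : Int) (hd : 0 < d) (h : a < b) :
    PySem.List.pyRange a b d = a :: PySem.List.pyRange (a + d) b d := by
  rw [PySem.List.pyRange_of_pos a b hd, PySem.List.pyRange_of_pos (a + d) b hd]
  have hd0 : d ≠ 0 := by omega
  have hcount : ((b - a + d - 1) / d) =
      (if a + d < b then ((b - (a + d) + d - 1) / d) else 0) + 1 := by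
    by_cases hab : a + d < b
    · simp only [hab, if_true]
      have : b - a + d - 1 = (b - (a + d) + d - 1) + 1 * d := by ring
      rw [this, Int.add_mul_ediv_right _ _ hd0]
    · simp only [hab, if_false]
      have h1 : 0 ≤ b - a - 1 := by omega
      have h2 : b - a - 1 < d := by omega
      have : b - a + d - 1 = (b - a - 1) + 1 * d := by ring
      rw [this, Int.add_mul_ediv_right _ _ hd0, Int.ediv_eq_zero_of_lt h1 h2]
  have hnn : 0 ≤ (if a + d < b then ((b - (a + d) + d - 1) / d) else 0) := by
    by_cases hab : a + d < b
    · simp only [hab, if_true]; exact Int.ediv_nonneg (by omega) (by omega)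
    · simp [hab]
  simp only [show a < b from h, if_true]
  rw [show (if a + d < b then ((b - (a + d) + d - 1) / d).toNat else 0)
        = (if a + d < b then ((b - (a + d) + d - 1) / d) else 0).toNat by
      by_cases hab : a + d < b <;> simp [hab]]
  rw [show ((b - a + d - 1) / d).toNat
        = (if a + d < b then ((b - (a + d) + d - 1) / d) else 0).toNat + 1 by omega]
  rw [List.range_succ_eq_map]
  simp only [List.map_cons, List.map_map, Function.comp]
  refine List.cons_eq_cons.mpr ⟨by push_cast; ring, ?_⟩
  apply List.map_congr_left
  intro kk _
  simp only [Function.comp_apply]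
  push_cast
  ring

-- ---- sum form of a fold that only accumulates ----
theorem foldl_add_sum (f : Int → Int) (n : Nat) (s : Int) :
    (PySem.List.pyRange 0 (n : Int) 1).foldl (fun acc j => acc + f j) s
      = s + ∑ j ∈ Finset.range n, f (j : Int) := by
  induction n with
  | zero => simp [PySem.List.pyRange_one_eq_nil]
  | succ m ih =>
      rw [show ((m + 1 : Nat) : Int) = (m : Int) + 1 by push_cast; ring,
          PySem.List.pyRange_one_succ_right (by positivity), List.foldl_append,
          Finset.sum_range_succ]
      simp [ih]
      ring

-- ---- cumsum characterisation ----
theorem stepAccum_eq (state : List Int) :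
    ∀ (acc : List Int) (t : Int),
      state.foldl (fun (p : List Int × Int) x => (p.1 ++ [p.2 + x], p.2 + x)) (acc, t)
        = (acc ++ (List.range state.length).map (fun m => t + (state.take (m+1)).sum),
           t + state.sum) := by
  induction state with
  | nil => intro acc t; simp
  | cons x xs ih =>
      intro acc t
      simp only [List.foldl_cons]
      rw [ih]
      rw [Prod.mk.injEq]
      constructor
      · rw [List.length_cons, List.range_succ_eq_map]
        simp only [List.map_cons, List.map_map, List.take_succ_cons,
          List.sum_cons, List.take_zero, List.sum_nil, add_zero, List.append_assoc,
          List.singleton_append]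
        congr 1
        congr 1
        apply List.map_congr_left
        intro kk _
        simp only [Function.comp_apply, List.take_succ_cons, List.sum_cons]
        ring
      · simp
        ring

theorem take_sum (state : List Int) (m : Nat) (hm : m ≤ state.length) :
    (state.take m).sum = pvC state m := by
  induction m with
  | zero => simp [pvC]
  | succ k ihk =>
      rw [List.sum_take_succ state k (by omega), ihk (by omega)]
      unfold pvC
      rw [Finset.sum_range_succ]
      congr 1
      simp [pvG, List.getD, List.getElem?_eq_getElem (show k < state.length by omega)]

theorem cumsum_getD (state : List Int) (m : Nat) (hm : m ≤ state.length) :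
    ([0] ++ (stepAccum state).1).getD m 0 = pvC state m := by
  unfold stepAccum
  rw [stepAccum_eq state [] 0]
  cases m with
  | zero => simp [pvC]
  | succ m' =>
      have hm' : m' < state.length := by omega
      simp only [List.nil_append, List.getD, List.singleton_append, List.getElem?_cons_succ]
      rw [List.getElem?_map]
      simp [List.getElem?_range hm']
      exact take_sum state (m' + 1) (by omega)

theorem cumsum_len (state : List Int) :
    ([0] ++ (stepAccum state).1).length = state.length + 1 := by
  unfold stepAccum
  rw [stepAccum_eq state [] 0]
  simp

theorem cumsum_pyGetD (state : List Int) (m : Nat) (hm : m ≤ state.length) :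
    PySem.List.pyGetD ([0] ++ (stepAccum state).1) (m : Int) 0 = pvC state m := by
  rw [PySem.List.pyGetD_natCast]
  exact cumsum_getD state m hm

-- ---- the inner loop of A ----
theorem innerA_eq (state : List Int) (st : Nat) (hst : 1 ≤ st) :
    ∀ (k : Nat) (s σ : Int),
      (((PySem.List.pyRange (k : Int) ((state.length : Nat) : Int) (2 * (st : Int))).foldl
        (fun (p : Int × Int) kk =>
          (p.1 + p.2 * (PySem.List.pyGetD ([0] ++ (stepAccum state).1)
                          (min (kk + (st : Int)) (PySem.List.len ([0] ++ (stepAccum state).1) - 1)) 0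
                        - PySem.List.pyGetD ([0] ++ (stepAccum state).1) kk 0),
           -p.2))
        (s, σ)).1
      = s + σ * ∑ j ∈ Finset.Ico k state.length, pvG state j * pvPat' ((j - k) / st)) := by
  have hst' : (1 : Int) ≤ (st : Int) := by exact_mod_cast hst
  suffices H : ∀ (fuel : Nat) (k : Nat), state.length - k ≤ fuel → ∀ (s σ : Int),
      (((PySem.List.pyRange (k : Int) ((state.length : Nat) : Int) (2 * (st : Int))).foldl
        (fun (p : Int × Int) kk =>
          (p.1 + p.2 * (PySem.List.pyGetD ([0] ++ (stepAccum state).1)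
                          (min (kk + (st : Int)) (PySem.List.len ([0] ++ (stepAccum state).1) - 1)) 0
                        - PySem.List.pyGetD ([0] ++ (stepAccum state).1) kk 0),
           -p.2))
        (s, σ)).1
      = s + σ * ∑ j ∈ Finset.Ico k state.length, pvG state j * pvPat' ((j - k) / st)) by
    intro k s σ
    exact H state.length k (by omega) s σ
  intro fuel
  induction fuel with
  | zero =>
      intro k hfk s σ
      have hk : state.length ≤ k := by omega
      rw [pyRange_pos_nil (k : Int) ((state.length : Nat) : Int) (2 * (st : Int)) (by omega)
        (by exact_mod_cast Int.ofNat_le.mpr hk)]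
      simp [Finset.Ico_eq_empty_of_le hk]
  | succ fuel ih =>
  intro k hfk s σ
  set n := state.length with hn
  by_cases hk : n ≤ k
  · rw [pyRange_pos_nil (k : Int) ((state.length : Nat) : Int) (2 * (st : Int)) (by omega)
        (by exact_mod_cast Int.ofNat_le.mpr hk)]
    simp [Finset.Ico_eq_empty_of_le hk]
  · push_neg at hk
    rw [pyRange_pos_cons (k : Int) ((state.length : Nat) : Int) (2 * (st : Int))
        (show (0:Int) < 2 * (st:Int) by omega)
        (show (k:Int) < ((state.length : Nat) : Int) by exact_mod_cast hk)]
    rw [List.foldl_cons]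
    have hcast : ((k : Int) + 2 * (st : Int)) = ((k + 2 * st : Nat) : Int) := by push_cast; ring
    rw [hcast]
    have := ih (k + 2 * st) (by omega)
    rw [this _ _]
    -- evaluate the two cumsum lookups
    have hlen : PySem.List.len ([0] ++ (stepAccum state).1) - 1 = (n : Int) := by
      rw [PySem.List.len_eq, cumsum_len]; push_cast; ring
    have hmin : min ((k : Int) + (st : Int)) (n : Int) = ((min (k + st) n : Nat) : Int) := by
      push_cast; omega
    rw [hlen, hmin, cumsum_pyGetD state (min (k + st) n) (by omega),
        cumsum_pyGetD state k (by omega)]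
    -- now pure sum manipulation
    have hsplit2 : ∑ j ∈ Finset.Ico k n, pvG state j * pvPat' ((j - k) / st)
        = (∑ j ∈ Finset.Ico k (min (k + 2*st) n), pvG state j * pvPat' ((j - k) / st))
          + ∑ j ∈ Finset.Ico (min (k + 2*st) n) n, pvG state j * pvPat' ((j - k) / st) := by
      rw [Finset.sum_Ico_consecutive _ (by omega) (by omega)]
    have hfirst : ∑ j ∈ Finset.Ico k (min (k + 2*st) n), pvG state j * pvPat' ((j - k) / st)
        = pvC state (min (k + st) n) - pvC state k := by
      rw [← Finset.sum_Ico_consecutive (fun j => pvG state j * pvPat' ((j - k) / st))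
            (show k ≤ min (k + st) n by omega) (show min (k + st) n ≤ min (k + 2*st) n by omega)]
      have hA : ∑ j ∈ Finset.Ico k (min (k + st) n), pvG state j * pvPat' ((j - k) / st)
          = pvC state (min (k + st) n) - pvC state k := by
        unfold pvC
        rw [← Finset.sum_Ico_eq_sub (pvG state) (show k ≤ min (k + st) n by omega)]
        apply Finset.sum_congr rfl
        intro j hj
        rw [Finset.mem_Ico] at hj
        have : (j - k) / st = 0 := Nat.div_eq_of_lt (by omega)
        simp [this, pvPat']
      have hB : ∑ j ∈ Finset.Ico (min (k + st) n) (min (k + 2*st) n),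
            pvG state j * pvPat' ((j - k) / st) = 0 := by
        apply Finset.sum_eq_zero
        intro j hj
        rw [Finset.mem_Ico] at hj
        have h1 : k + st ≤ j := by omega
        have h2 : j < k + 2 * st := by omega
        have : (j - k) / st = 1 := Nat.div_eq_of_lt_le (by omega) (by omega)
        simp [this, pvPat']
      rw [hA, hB]; ring
    have hsecond : ∑ j ∈ Finset.Ico (min (k + 2*st) n) n, pvG state j * pvPat' ((j - k) / st)
        = - ∑ j ∈ Finset.Ico (k + 2*st) n, pvG state j * pvPat' ((j - (k + 2*st)) / st) := by
      by_cases hbig : k + 2*st < n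
      · rw [show min (k + 2*st) n = k + 2*st by omega]
        rw [← Finset.sum_neg_distrib]
        apply Finset.sum_congr rfl
        intro j hj
        rw [Finset.mem_Ico] at hj
        have hj2 : j - k = (j - (k + 2*st)) + 2 * st := by omega
        rw [hj2]
        have : ((j - (k + 2*st)) + 2 * st) / st = (j - (k + 2*st)) / st + 2 :=
          Nat.add_mul_div_right _ _ (by omega)
        rw [this, pvPat'_add_two]
        ring
      · rw [show min (k + 2*st) n = n by omega]
        rw [Finset.Ico_self, Finset.Ico_eq_empty_of_le (by omega)]
        simp
    rw [hsplit2, hfirst, hsecond]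
    ring

-- ---- the inner sum of B ----
theorem stepAltSum_eq (state : List Int) (i : Nat) :
    stepAltSum state (state.length : Int) (i : Int)
      = ∑ j ∈ Finset.range state.length, pvG state j * pvPat ((j + 1) / (i + 1)) := by
  unfold stepAltSum
  rw [foldl_add_sum]
  rw [zero_add]
  apply Finset.sum_congr rfl
  intro j hj
  rw [Finset.mem_range] at hj
  congr 1
  · rw [show ((j : Int)) = ((j : Nat) : Int) from rfl, PySem.List.pyGetD_natCast]
    rfl
  · -- the base-table lookup is pvPat ((j+1)/(i+1))
    have hdiv : PySem.Int.floordiv ((j : Int) + 1) ((i : Int) + 1)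
        = (((j + 1) / (i + 1) : Nat) : Int) := by
      unfold PySem.Int.floordiv
      have hb : (0 : Int) ≤ (i : Int) + 1 := by positivity
      rw [Int.fdiv_eq_ediv]
      have h1 : ((j : Int) + 1) = (((j + 1 : Nat)) : Int) := by push_cast; ring
      have h2 : ((i : Int) + 1) = (((i + 1 : Nat)) : Int) := by push_cast; ring
      rw [h1, h2, ← Int.natCast_div]
      simp [hb]
    rw [hdiv]
    unfold PySem.Int.mod
    have hmod : ((((j + 1) / (i + 1) : Nat)) : Int).fmod 4
        = ((((j + 1) / (i + 1) % 4 : Nat)) : Int) := by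
      rw [Int.fmod_eq_emod, Int.natCast_mod]
      simp
    rw [hmod, PySem.List.pyGetD_natCast]
    have h4 : (j + 1) / (i + 1) % 4 = 0 ∨ (j + 1) / (i + 1) % 4 = 1
        ∨ (j + 1) / (i + 1) % 4 = 2 ∨ (j + 1) / (i + 1) % 4 = 3 := by omega
    unfold pvPat
    rcases h4 with h | h | h | h <;> simp [h]

-- B's per-i sum equals the Ico-form that A's inner loop produces
theorem sumB_eq_sumA (state : List Int) (i : Nat) (hi : i < state.length) :
    ∑ j ∈ Finset.range state.length, pvG state j * pvPat ((j + 1) / (i + 1))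
      = ∑ j ∈ Finset.Ico i state.length, pvG state j * pvPat' ((j - i) / (i + 1)) := by
  rw [Finset.range_eq_Ico,
      ← Finset.sum_Ico_consecutive (fun j => pvG state j * pvPat ((j + 1) / (i + 1)))
        (Nat.zero_le i) (le_of_lt hi)]
  have h0 : ∑ j ∈ Finset.Ico 0 i, pvG state j * pvPat ((j + 1) / (i + 1)) = 0 := by
    apply Finset.sum_eq_zero
    intro j hj
    rw [Finset.mem_Ico] at hj
    have : (j + 1) / (i + 1) = 0 := Nat.div_eq_of_lt (by omega)
    simp [this, pvPat]
  rw [h0, zero_add]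
  apply Finset.sum_congr rfl
  intro j hj
  rw [Finset.mem_Ico] at hj
  have hj2 : j + 1 = (j - i) + (i + 1) := by omega
  rw [hj2, Nat.add_div_right _ (by omega), pvPat_succ]

-- ---- outer loop of A ----
def pvValA (state : List Int) (ii : Int) : Int :=
  PySem.Int.mod
    |((PySem.List.pyRange ii ((state.length : Nat) : Int) (2 * (ii + 1))).foldl
        (fun (p : Int × Int) kk =>
          (p.1 + p.2 * (PySem.List.pyGetD ([0] ++ (stepAccum state).1)
                          (min (kk + (ii + 1)) (PySem.List.len ([0] ++ (stepAccum state).1) - 1)) 0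
                        - PySem.List.pyGetD ([0] ++ (stepAccum state).1) kk 0),
           -p.2))
        (0, 1)).1|
    10

theorem pySetD_natCast {α : Type} (L : List α) (i : Nat) (v : α) (h : i < L.length) :
    PySem.List.pySetD L (i : Int) v = L.set i v := by
  unfold PySem.List.pySetD PySem.List.pySet? PySem.List.pyIdx?
  have h' : ((i : Int)) < (L.length : Int) := by exact_mod_cast h
  simp [h']

theorem outerA (state : List Int) :
    ∀ (fuel i : Nat) (L : List Int), state.length - i ≤ fuel → L.length = state.length →
      (((PySem.List.pyRange (i : Int) ((state.length : Nat) : Int) 1).foldl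
          (stepBody ([0] ++ (stepAccum state).1) ((state.length : Nat) : Int))
          ((i : Int), (i : Int) + 1, 1, L)).2.2.2)
        = L.take i ++ (PySem.List.pyRange (i : Int) ((state.length : Nat) : Int) 1).map
            (pvValA state) := by
  intro fuel
  induction fuel with
  | zero =>
      intro i L hfi hL
      have hi : state.length ≤ i := by omega
      rw [PySem.List.pyRange_one_eq_nil (by exact_mod_cast Int.ofNat_le.mpr hi)]
      simp only [List.foldl_nil, List.map_nil, List.append_nil]
      rw [List.take_of_length_le (by omega)]
  | succ fuel ih =>
      intro i L hfi hL
      by_cases hi : state.length ≤ i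
      · rw [PySem.List.pyRange_one_eq_nil (by exact_mod_cast Int.ofNat_le.mpr hi)]
        simp only [List.foldl_nil, List.map_nil, List.append_nil]
        rw [List.take_of_length_le (by omega)]
      · push_neg at hi
        rw [PySem.List.pyRange_one_cons (show (i : Int) < ((state.length : Nat) : Int) by
              exact_mod_cast hi)]
        rw [List.foldl_cons, List.map_cons]
        have hbody : stepBody ([0] ++ (stepAccum state).1) ((state.length : Nat) : Int)
              ((i : Int), (i : Int) + 1, 1, L) (i : Int)
            = ((i : Int) + 1, ((i : Int) + 1) + 1, 1,
               PySem.List.pySetD L (i : Int) (pvValA state (i : Int))) := rfl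
        rw [hbody]
        have hset : PySem.List.pySetD L (i : Int) (pvValA state (i : Int))
            = L.set i (pvValA state (i : Int)) := pySetD_natCast L i _ (by omega)
        have hcast : ((i : Int) + 1) = (((i + 1 : Nat)) : Int) := by push_cast; ring
        rw [hset, hcast]
        rw [ih (i + 1) (L.set i (pvValA state (i : Int))) (by omega) (by simp [hL])]
        rw [List.set_eq_take_append_cons_drop]
        simp only [show i < L.length by omega, if_true]
        have htake : (L.take i ++ pvValA state (i : Int) :: L.drop (i + 1)).take (i + 1)
            = L.take i ++ [pvValA state (i : Int)] := by
          have hlt : (L.take i).length = i := by simp; omega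
          rw [show i + 1 = (L.take i).length + 1 by omega, List.take_append]
          simp
        rw [htake, List.append_assoc, List.singleton_append]

-- value equality per output position
theorem valA_eq_valB (state : List Int) (i : Nat) (hi : i < state.length) :
    pvValA state (i : Int)
      = PySem.Int.mod |stepAltSum state ((state.length : Nat) : Int) (i : Int)| 10 := by
  unfold pvValA
  have hc : ((i : Int) + 1) = (((i + 1 : Nat)) : Int) := by push_cast; ring
  simp only [hc]
  rw [innerA_eq state (i + 1) (by omega) i 0 1]
  rw [stepAltSum_eq state i, sumB_eq_sumA state i hi]
  ring_nf

-- ===== VERDICT (by name: the statement is the Claim_ definition above) =====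
theorem step_spec : Claim_equal_step := by
  intro state _
  unfold Spec_step step step_alt
  simp only [PySem.List.len_eq]
  have h := outerA state state.length 0 (List.replicate state.length 0) (by omega) (by simp)
  simp only [Nat.cast_zero, zero_add, List.take_zero, List.nil_append] at h
  rw [h]
  apply List.map_congr_left
  intro ii hii
  rw [PySem.List.mem_pyRange_one] at hii
  obtain ⟨h0i, hin⟩ := hii
  have hiN : ii = ((ii.toNat : Nat) : Int) := by omega
  rw [hiN]
  exact valA_eq_valB state ii.toNat (by omega)
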